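-- pv_equiv track=rewrite | github.com/mrlibro1995/RLforcefield | rlff/system.py | adjust_tuple_to_avoid_negatives
-- ===== SOURCE A (Python) =====
-- def adjust_tuple_to_avoid_negatives(next_action, location, global_radius):
--     # Check if both tuples have the same number of elements
--     if len(next_action) != len(location):
--         raise ValueError("Tuples must have the same number of elements")
--
--     # Sum the tuples element-wise
--     sum_tuple = tuple(x + y for x, y in zip(next_action, location))
--
--     for indx, element in enumerate(sum_tuple):
--         if element < 0:
--             temp_list = list(next_action)
--             temp_list[indx] = abs(element) + temp_list[indx]
--             next_action = tuple(temp_list)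
--         elif element > global_radius * 2:
--             temp_list = list(next_action)
--             temp_list[indx] = 0
--             next_action = tuple(temp_list)
--     return next_action
-- ===== SOURCE B (Python) =====
-- def adjust_tuple_to_avoid_negatives(next_action, location, global_radius):
--     if len(next_action) != len(location):
--         raise ValueError("Tuples must have the same number of elements")
--     hi = global_radius * 2
--     out = []
--     for x, y in zip(next_action, location):
--         s = x + y
--         out.append(-y if s < 0 else (0 if s > hi else x))
--     return tuple(out)
-- ===== Notes on version B (the rewrite author's own statement) =====
-- stated objective: faster
-- what changed: B computes each adjusted coordinate directly in one zip pass appending to a single output list (s<0 -> -y, s>2r -> 0, else x), instead of A's loop that rebuilds a fresh list and tuple on every adjusted index.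
import Mathlib
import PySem

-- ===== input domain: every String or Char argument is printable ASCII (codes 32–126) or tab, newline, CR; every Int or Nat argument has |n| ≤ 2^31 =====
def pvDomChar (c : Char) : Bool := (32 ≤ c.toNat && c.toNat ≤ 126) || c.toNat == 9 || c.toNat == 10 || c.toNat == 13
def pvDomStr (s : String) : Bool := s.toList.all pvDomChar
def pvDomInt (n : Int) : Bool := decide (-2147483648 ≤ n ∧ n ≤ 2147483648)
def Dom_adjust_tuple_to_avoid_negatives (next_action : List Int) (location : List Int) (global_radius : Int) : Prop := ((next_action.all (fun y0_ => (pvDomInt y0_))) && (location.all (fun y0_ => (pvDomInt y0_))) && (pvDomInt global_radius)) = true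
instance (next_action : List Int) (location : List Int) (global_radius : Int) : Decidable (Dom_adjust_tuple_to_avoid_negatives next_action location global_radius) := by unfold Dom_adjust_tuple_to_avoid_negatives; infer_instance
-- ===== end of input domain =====

-- B replaces A's per-index list/tuple rebuilding with one zip pass appending each adjusted
-- coordinate to a single output list (objective: faster, O(n) vs O(n^2)).

-- ===== PORT A =====
-- step of A's for-loop: temp_list[indx] assignment; indx is an enumerate index (always ≥ 0 and
-- in range under Pre_), so .toNat-indexed set/getD is exact here.
def pvStepA (global_radius : Int) (cur : List Int) (ie : Int × Int) : List Int :=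
  if ie.2 < 0 then cur.set ie.1.toNat (|ie.2| + cur.getD ie.1.toNat 0)
  else if ie.2 > global_radius * 2 then cur.set ie.1.toNat 0
  else cur

def adjust_tuple_to_avoid_negatives (next_action : List Int) (location : List Int) (global_radius : Int) : List Int :=
  let sum_tuple := List.zipWith (· + ·) next_action location
  (PySem.List.enumerate sum_tuple 0).foldl (pvStepA global_radius) next_action

-- ===== PORT B =====
def adjust_tuple_to_avoid_negatives_alt (next_action : List Int) (location : List Int) (global_radius : Int) : List Int :=
  List.zipWith (fun x y => if x + y < 0 then -y else if x + y > global_radius * 2 then 0 else x)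
    next_action location

-- ===== PRECONDITION & SPEC =====
-- A raises ValueError when the two tuples differ in length; exactly those inputs are excluded.
def Pre_adjust_tuple_to_avoid_negatives (next_action : List Int) (location : List Int) (global_radius : Int) : Prop :=
  next_action.length = location.length
instance (next_action : List Int) (location : List Int) (global_radius : Int) : Decidable (Pre_adjust_tuple_to_avoid_negatives next_action location global_radius) := by unfold Pre_adjust_tuple_to_avoid_negatives; infer_instance

def pvWitness_adjust_tuple_to_avoid_negatives : List Int × List Int × Int := ([1, -3, 4], ([-2, 1, 1], 2))

def Spec_adjust_tuple_to_avoid_negatives (next_action : List Int) (location : List Int) (global_radius : Int) (out : List Int) : Prop := out = adjust_tuple_to_avoid_negatives_alt next_action location global_radius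
instance (next_action : List Int) (location : List Int) (global_radius : Int) (out : List Int) : Decidable (Spec_adjust_tuple_to_avoid_negatives next_action location global_radius out) := by unfold Spec_adjust_tuple_to_avoid_negatives; infer_instance

-- ===== CLAIM (what is proved, stated in full; the proofs are below) =====
def Claim_equal_adjust_tuple_to_avoid_negatives : Prop := ∀ (next_action : List Int) (location : List Int) (global_radius : Int), Dom_adjust_tuple_to_avoid_negatives next_action location global_radius → Pre_adjust_tuple_to_avoid_negatives next_action location global_radius → Spec_adjust_tuple_to_avoid_negatives next_action location global_radius (adjust_tuple_to_avoid_negatives next_action location global_radius)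

-- ===== LEMMAS AND PROOFS =====

-- A's fold over enumerate indices starting at s+1 leaves the head untouched.
theorem pv_shift (r : Int) (xs : List Int) :
    ∀ (s : Int), 0 ≤ s → ∀ (c : Int) (tl : List Int),
    (PySem.List.enumerate xs (s + 1)).foldl (pvStepA r) (c :: tl)
      = c :: (PySem.List.enumerate xs s).foldl (pvStepA r) tl := by
  induction xs with
  | nil => intro s hs c tl; simp [PySem.List.enumerate]
  | cons x xs ih =>
    intro s hs c tl
    rw [PySem.List.enumerate_cons, PySem.List.enumerate_cons]
    simp only [List.foldl_cons]
    have hset : pvStepA r (c :: tl) (s + 1, x) = c :: pvStepA r tl (s, x) := by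
      have h1 : (s + 1).toNat = s.toNat + 1 := by omega
      simp only [pvStepA, h1]
      split_ifs <;> rfl
    rw [hset]
    exact ih (s + 1) (by omega) c (pvStepA r tl (s, x))

theorem pv_main (r : Int) : ∀ (na loc : List Int), na.length = loc.length →
    (PySem.List.enumerate (List.zipWith (· + ·) na loc) 0).foldl (pvStepA r) na
      = adjust_tuple_to_avoid_negatives_alt na loc r := by
  intro na
  induction na with
  | nil =>
    intro loc h
    cases loc with
    | nil => simp [adjust_tuple_to_avoid_negatives_alt]
    | cons y ys => simp at h
  | cons x xs ih =>
    intro loc h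
    cases loc with
    | nil => simp at h
    | cons y ys =>
      have hlen : xs.length = ys.length := by simpa using h
      simp only [List.zipWith_cons_cons, PySem.List.enumerate_cons, List.foldl_cons]
      have hstep : pvStepA r (x :: xs) (0, x + y)
          = (if x + y < 0 then -y else if x + y > r * 2 then 0 else x) :: xs := by
        by_cases hneg : x + y < 0
        · have : |x + y| = -(x + y) := abs_of_neg hneg
          simp [pvStepA, hneg, this]
        · by_cases hbig : x + y > r * 2
          · simp [pvStepA, hneg, hbig]
          · simp [pvStepA, hneg, hbig]
      rw [hstep, pv_shift r _ 0 le_rfl, ih ys hlen]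
      simp [adjust_tuple_to_avoid_negatives_alt]

-- ===== VERDICT (by name: the statement is the Claim_ definition above) =====
theorem adjust_tuple_to_avoid_negatives_spec : Claim_equal_adjust_tuple_to_avoid_negatives := by
  intro na loc r _ hpre
  unfold Spec_adjust_tuple_to_avoid_negatives adjust_tuple_to_avoid_negatives
  exact pv_main r na loc hpre
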